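-- pv_equiv track=rewrite | github.com/umbs/practice | IK/sorting/HW/LexicographicalOrder.py | solve
-- ===== SOURCE A (Python) =====
-- def solve(arr):
--     # (k, [count, highest_value])
--     res = dict()
--
--     for s in arr:
--         k, v = s.split()
--         if k in res:
--             count, old_str = res[k]
--             res[k] = [count+1, max(v, old_str)]
--         else:
--             res[k] = [1, v]
--
--
--     out = list()
--     for k, v in res.items():
--         out.append(''.join(k + ':' + str(v[0]) + ',' + v[1]))
--
--     return out
-- ===== SOURCE B (Python) =====
-- def solve(arr):
--     # Pass 1: group every value under its key (keys in first-occurrence order).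
--     groups = {}
--     for s in arr:
--         k, v = s.split()
--         groups.setdefault(k, []).append(v)
--     # Pass 2: reduce each group to "key:count,maximum".
--     return [f"{k}:{len(vs)},{max(vs)}" for k, vs in groups.items()]
-- ===== Notes on version B (the rewrite author's own statement) =====
-- stated objective: alternative
-- what changed: Replaces A's single pass maintaining a running [count, max] aggregate per key with a two-stage decomposition: first group all values into per-key lists, then reduce each group with len() and max(); Pre_ excludes inputs containing a string that does not split into exactly two whitespace-separated tokens, on which A raises ValueError.
import Mathlib
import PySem

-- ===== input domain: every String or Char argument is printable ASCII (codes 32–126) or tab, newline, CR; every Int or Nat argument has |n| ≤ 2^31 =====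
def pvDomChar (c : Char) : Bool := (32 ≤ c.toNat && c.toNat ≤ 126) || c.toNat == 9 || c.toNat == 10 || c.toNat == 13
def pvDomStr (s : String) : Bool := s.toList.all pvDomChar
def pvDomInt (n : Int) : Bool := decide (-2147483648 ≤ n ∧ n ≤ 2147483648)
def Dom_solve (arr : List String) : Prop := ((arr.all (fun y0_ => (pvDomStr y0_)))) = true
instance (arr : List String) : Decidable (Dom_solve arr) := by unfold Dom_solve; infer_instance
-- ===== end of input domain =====

-- B is a two-pass collect-then-reduce decomposition of A's single-pass running aggregate; both build the same lines.

-- ===== PORT A =====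
-- single pass keeping a (count, highest value) pair per key
def solveStep (d : PySem.Dict String (Int × String)) (s : String) : PySem.Dict String (Int × String) :=
  match PySem.Str.split₀ s with
  | [k, v] =>
    match d.get? k with                      -- 'if k in res' + 'res[k]'
    | some (count, old) => d.insert k (count + 1, max v old)
    | none => d.insert k (1, v)
  | _ => d                                   -- s.split() not two tokens: Python raises ValueError (outside Pre_solve)

def solve (arr : List String) : List String :=
  let res := arr.foldl solveStep PySem.Dict.empty
  res.items.foldl (fun out p => out ++ [p.1 ++ ":" ++ PySem.Int.toStr p.2.1 ++ "," ++ p.2.2]) []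

-- ===== PORT B =====
-- pass 1: group values per key
def groupStep (d : PySem.Dict String (List String)) (s : String) : PySem.Dict String (List String) :=
  match PySem.Str.split₀ s with
  | [k, v] => d.modify k [] (fun vs => vs ++ [v])   -- groups.setdefault(k, []).append(v)
  | _ => d                                          -- outside Pre_solve

-- max(vs) for a nonempty list (Python raises on [], unreachable here)
def pyMaxStr (vs : List String) : String :=
  match PySem.List.max? vs (fun x => x) with
  | some m => m
  | none => ""

def solve_alt (arr : List String) : List String :=
  let groups := arr.foldl groupStep PySem.Dict.empty
  groups.items.map (fun p => p.1 ++ ":" ++ PySem.Int.toStr (p.2.length : Int) ++ "," ++ pyMaxStr p.2)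

-- ===== PRECONDITION & SPEC =====
-- Pre_ excludes inputs containing a string that does not split into exactly two
-- whitespace-separated tokens: there A's 'k, v = s.split()' raises ValueError.
def Pre_solve (arr : List String) : Prop := ∀ s ∈ arr, (PySem.Str.split₀ s).length = 2
instance (arr : List String) : Decidable (Pre_solve arr) := by unfold Pre_solve; infer_instance

def pvWitness_solve : List String := ["a 1", "b 2", "a 3"]

def Spec_solve (arr : List String) (out : List String) : Prop := out = solve_alt arr
instance (arr : List String) (out : List String) : Decidable (Spec_solve arr out) := by unfold Spec_solve; infer_instance

-- ===== CLAIM (what is proved, stated in full; the proofs are below) =====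
def Claim_equal_solve : Prop := ∀ (arr : List String), Dom_solve arr → Pre_solve arr → Spec_solve arr (solve arr)

-- ===== LEMMAS AND PROOFS =====

-- the per-key aggregate A maintains, as a function of B's group
def aggr (vs : List String) : Int × String := ((vs.length : Int), pyMaxStr vs)

def dictInv (dA : PySem.Dict String (Int × String)) (dB : PySem.Dict String (List String)) : Prop :=
  dA = PySem.Dict.mk (dB.items.map (fun p => (p.1, aggr p.2))) ∧
  (∀ p ∈ dB.items, p.2 ≠ []) ∧ dB.keys.Nodup

theorem pyMaxStr_cons (x : String) (t : List String) : pyMaxStr (x :: t) = t.foldl max x := by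
  simp [pyMaxStr, PySem.List.max?_id_cons]

theorem pyMaxStr_append (vs : List String) (v : String) (h : vs ≠ []) :
    pyMaxStr (vs ++ [v]) = max v (pyMaxStr vs) := by
  obtain ⟨x, t, rfl⟩ := List.exists_cons_of_ne_nil h
  simp [pyMaxStr_cons, List.foldl_append, max_comm]

theorem get?_mk_map (l : List (String × List String)) (k : String) :
    (PySem.Dict.mk (l.map (fun p => (p.1, aggr p.2)))).get? k = (Option.map aggr ((PySem.Dict.mk l).get? k)) := by
  induction l with
  | nil => simp [PySem.Dict.get?]
  | cons p rest ih =>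
    obtain ⟨pk, pv⟩ := p
    simp only [List.map_cons, PySem.Dict.get?_mk_cons]
    by_cases h : pk == k <;> simp [h, ih]

theorem modify_eq_insert (d : PySem.Dict String (List String)) (k : String)
    (f : List String → List String) : d.modify k [] f = d.insert k (f (d.getD k [])) := rfl

theorem get?_inv (dA : PySem.Dict String (Int × String)) (dB : PySem.Dict String (List String))
    (h : dA = PySem.Dict.mk (dB.items.map (fun p => (p.1, aggr p.2)))) (k : String) :
    dA.get? k = Option.map aggr (dB.get? k) := by
  rw [h, get?_mk_map]

theorem inv_step (dA : PySem.Dict String (Int × String)) (dB : PySem.Dict String (List String))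
    (s : String) (h : dictInv dA dB) : dictInv (solveStep dA s) (groupStep dB s) := by
  obtain ⟨h1, h2, h3⟩ := h
  rcases hs : PySem.Str.split₀ s with _ | ⟨k, _ | ⟨v, _ | ⟨w, rest⟩⟩⟩
  · simp only [solveStep, groupStep, hs]; exact ⟨h1, h2, h3⟩
  · simp only [solveStep, groupStep, hs]; exact ⟨h1, h2, h3⟩
  · -- exactly two tokens
    have hget := get?_inv dA dB h1 k
    simp only [solveStep, groupStep, hs, modify_eq_insert]
    rcases hB : dB.get? k with _ | vs
    · -- k is a new key
      have hcA : dA.contains k = false := by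
        rw [PySem.Dict.contains_eq_isSome_get?, hget, hB]; rfl
      have hcB : dB.contains k = false := by
        rw [PySem.Dict.contains_eq_isSome_get?, hB]; rfl
      rw [hget, hB]
      simp only [Option.map_none]
      refine ⟨?_, ?_, ?_⟩
      · apply PySem.Dict.ext
        rw [PySem.Dict.items_insert_of_not_contains _ _ hcA,
            PySem.Dict.items_insert_of_not_contains _ _ hcB]
        have hgd0 : dB.getD k [] = [] := PySem.Dict.getD_of_not_contains _ _ hcB
        have : dA.items = dB.items.map (fun p => (p.1, aggr p.2)) := by rw [h1]
        simp [this, aggr, hgd0, pyMaxStr_cons]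
      · intro p hp
        rw [PySem.Dict.items_insert_of_not_contains _ _ hcB] at hp
        rcases List.mem_append.mp hp with hp | hp
        · exact h2 p hp
        · simp at hp; subst hp; simp
      · exact PySem.Dict.nodup_keys_insert _ _ _ h3
    · -- k already present, dB.get? k = some vs
      have hvs : vs ≠ [] := h2 (k, vs) (PySem.Dict.mem_items_of_get?_eq_some _ hB)
      have hcB : dB.contains k = true := by
        rw [PySem.Dict.contains_eq_isSome_get?, hB]; rfl
      have hcA : dA.contains k = true := by
        rw [PySem.Dict.contains_eq_isSome_get?, hget, hB]; rfl
      have hgd : dB.getD k [] = vs := PySem.Dict.getD_of_get?_eq_some _ _ hB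
      rw [hget, hB]
      simp only [Option.map_some, aggr]
      refine ⟨?_, ?_, ?_⟩
      · apply PySem.Dict.ext
        rw [PySem.Dict.items_insert_of_contains _ _ hcA,
            PySem.Dict.items_insert_of_contains _ _ hcB, hgd]
        have hitems : dA.items = dB.items.map (fun p => (p.1, aggr p.2)) := by rw [h1]
        rw [hitems, List.map_map, List.map_map]
        apply List.map_congr_left
        intro p hp
        by_cases hk : p.1 == k
        · have hpk : p.1 = k := by simpa using hk
          have hsome : dB.get? p.1 = some p.2 := PySem.Dict.get?_of_mem_items _ hp h3
          rw [hpk, hB] at hsome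
          simp only [Function.comp, hk, if_pos]
          simp [aggr, pyMaxStr_append vs v hvs]
        · simp [Function.comp, hk]
      · intro p hp
        rw [PySem.Dict.items_insert_of_contains _ _ hcB] at hp
        obtain ⟨q, hq, hqe⟩ := List.mem_map.mp hp
        by_cases hk : q.1 == k
        · rw [if_pos hk] at hqe; subst hqe; simp [hgd]
        · rw [if_neg hk] at hqe; subst hqe; exact h2 q hq
      · exact PySem.Dict.nodup_keys_insert _ _ _ h3
  · simp only [solveStep, groupStep, hs]; exact ⟨h1, h2, h3⟩

theorem inv_foldl (arr : List String) (dA : PySem.Dict String (Int × String))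
    (dB : PySem.Dict String (List String)) (h : dictInv dA dB) :
    dictInv (arr.foldl solveStep dA) (arr.foldl groupStep dB) := by
  induction arr generalizing dA dB with
  | nil => exact h
  | cons s rest ih => exact ih _ _ (inv_step _ _ _ h)

-- ===== VERDICT (by name: the statement is the Claim_ definition above) =====
theorem solve_spec : Claim_equal_solve := by
  intro arr _ _
  show _ = _
  have h := inv_foldl arr PySem.Dict.empty PySem.Dict.empty
    ⟨by simp [PySem.Dict.empty], by simp [PySem.Dict.empty], by simp [PySem.Dict.empty, PySem.Dict.keys]⟩
  obtain ⟨h1, _, _⟩ := h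
  simp only [solve, solve_alt, h1]
  rw [PySem.List.foldl_append_singleton_eq_map]
  simp [aggr]
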